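-- pv_equiv track=rewrite | github.com/pseudo11235813/Random-Useful-Python-Scripts | ANAGRAMM_GENERATOR.py | divide_on
-- ===== SOURCE A (Python) =====
-- def divide_on(list):
--     numb = 1
--     deja = []
--     for item in list:
--         if list.count(item) > 1 and item not in deja:
--             numb *= list.count(item)
--             deja.append(item)
--     return numb
-- ===== SOURCE B (Python) =====
-- def divide_on(list):
--     s = sorted(list)
--     numb = 1
--     i = 0
--     n = len(s)
--     while i < n:
--         j = i + 1
--         while j < n and s[j] == s[i]:
--             j += 1
--         if j - i > 1:
--             numb *= j - i
--         i = j
--     return numb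
-- ===== Notes on version B (the rewrite author's own statement) =====
-- stated objective: faster
-- what changed: Replaces the per-element list.count scans and the deja membership list with one sort followed by a single pass that multiplies the lengths of runs of equal elements.
import Mathlib
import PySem

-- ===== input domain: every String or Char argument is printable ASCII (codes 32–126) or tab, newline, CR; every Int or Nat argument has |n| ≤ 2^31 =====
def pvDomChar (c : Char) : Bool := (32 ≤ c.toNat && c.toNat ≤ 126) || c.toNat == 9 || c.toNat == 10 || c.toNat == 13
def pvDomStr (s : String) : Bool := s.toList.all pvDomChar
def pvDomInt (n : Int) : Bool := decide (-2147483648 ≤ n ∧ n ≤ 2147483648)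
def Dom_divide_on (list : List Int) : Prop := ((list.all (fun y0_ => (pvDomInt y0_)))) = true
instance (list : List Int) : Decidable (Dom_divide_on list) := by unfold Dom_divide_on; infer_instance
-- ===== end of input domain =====

-- B sorts the list once and multiplies the lengths of runs of equal elements in one pass,
-- instead of A's repeated list.count scans with a deja membership list (asymptotically faster).

-- ===== PORT A =====
-- for item in list: if list.count(item) > 1 and item not in deja: numb *= list.count(item); deja.append(item)
def divide_on (list : List Int) : Int :=
  (list.foldl (fun (st : Int × List Int) item =>
      if PySem.List.count list item > 1 ∧ item ∉ st.2 then
        (st.1 * (PySem.List.count list item : Int), st.2 ++ [item])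
      else st) (1, ([] : List Int))).1

-- ===== PORT B =====
-- the outer while-loop advances i to j = end of the current run of equal elements; modelled as
-- structural recursion on the remaining suffix s[i:], with the inner while-loop as takeWhile/dropWhile
def divide_on_go : List Int → Int
  | [] => 1
  | a :: r =>
    let k : Nat := 1 + (r.takeWhile (fun x => x == a)).length
    let rest := divide_on_go (r.dropWhile (fun x => x == a))
    if 1 < k then (k : Int) * rest else rest
termination_by s => s.length
decreasing_by
  simpa using Nat.lt_succ_of_le (List.length_dropWhile_le _ r)

def divide_on_alt (list : List Int) : Int :=
  divide_on_go (PySem.List.sorted list (fun x => x) false)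

-- ===== PRECONDITION & SPEC =====
def Spec_divide_on (list : List Int) (out : Int) : Prop := out = divide_on_alt list
instance (list : List Int) (out : Int) : Decidable (Spec_divide_on list out) := by unfold Spec_divide_on; infer_instance

-- ===== CLAIM (what is proved, stated in full; the proofs are below) =====
def Claim_equal_divide_on : Prop := ∀ (list : List Int), Dom_divide_on list → Spec_divide_on list (divide_on list)

-- ===== LEMMAS AND PROOFS =====

theorem divide_on_foldl (list : List Int) :
    ∀ (r seen : List Int) (n : Int), (∀ x ∈ r, x ∈ list) →
    (r.foldl (fun (st : Int × List Int) item =>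
      if PySem.List.count list item > 1 ∧ item ∉ st.2 then
        (st.1 * (PySem.List.count list item : Int), st.2 ++ [item])
      else st) (n, seen)).1
      = n * ∏ x ∈ r.toFinset \ seen.toFinset, (List.count x list : Int) := by
  intro r
  induction r with
  | nil => intro seen n _; simp
  | cons a r ih =>
    intro seen n hsub
    have ha : a ∈ list := hsub a (by simp)
    have hsub' : ∀ x ∈ r, x ∈ list := fun x hx => hsub x (by simp [hx])
    simp only [List.foldl_cons]
    by_cases hmem : a ∈ seen
    · have hcond : ¬ (PySem.List.count list a > 1 ∧ a ∉ seen) := by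
        intro h; exact h.2 hmem
      rw [if_neg hcond, ih seen n hsub']
      have : (a :: r).toFinset \ seen.toFinset = r.toFinset \ seen.toFinset := by
        simp only [List.toFinset_cons]
        exact Finset.insert_sdiff_of_mem _ (by simpa using hmem)
      rw [this]
    · have hsd : (a :: r).toFinset \ seen.toFinset
          = insert a (r.toFinset \ seen.toFinset) := by
        ext x
        simp only [List.toFinset_cons, Finset.mem_sdiff, Finset.mem_insert, List.mem_toFinset]
        constructor
        · rintro ⟨h1 | h1, h2⟩
          · exact Or.inl h1
          · exact Or.inr ⟨h1, h2⟩
        · rintro (h1 | ⟨h1, h2⟩)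
          · exact ⟨Or.inl h1, by simpa [h1] using hmem⟩
          · exact ⟨Or.inr h1, h2⟩
      have hprod : (∏ x ∈ (a :: r).toFinset \ seen.toFinset, (List.count x list : Int))
          = (List.count a list : Int) * ∏ x ∈ (r.toFinset \ seen.toFinset).erase a, (List.count x list : Int) := by
        have hie : insert a (r.toFinset \ seen.toFinset)
            = insert a ((r.toFinset \ seen.toFinset).erase a) := by
          ext x; simp; tauto
        rw [hsd, hie]
        exact Finset.prod_insert (Finset.notMem_erase _ _)
      by_cases hcnt : PySem.List.count list a > 1
      · rw [if_pos ⟨hcnt, hmem⟩, ih (seen ++ [a]) _ hsub']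
        have hseen : (seen ++ [a]).toFinset = insert a seen.toFinset := by
          ext x; simp
        rw [hseen, Finset.sdiff_insert, hprod]
        have hc : (PySem.List.count list a : Int) = (List.count a list : Int) := by
          simp [PySem.List.count_eq]
        rw [hc]; ring
      · rw [if_neg (by intro h; exact hcnt h.1), ih seen n hsub']
        have hc1 : List.count a list = 1 := by
          have h1 : 1 ≤ List.count a list := List.count_pos_iff.mpr ha
          have h2 : PySem.List.count list a = List.count a list := by
            simp [PySem.List.count_eq]
          omega
        rw [hprod, hc1]
        rw [Finset.prod_erase _ (by rw [hc1]; norm_num)]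
        push_cast; ring
-- every element of the takeWhile-prefix equals a
theorem mem_takeWhile_eq (a : Int) (r : List Int) :
    ∀ x ∈ r.takeWhile (fun x => x == a), x = a := by
  intro x hx
  have := List.mem_takeWhile_imp hx
  simpa using this

-- in a sorted list whose elements are all ≥ a, dropping the leading a-run drops ALL a's
theorem not_mem_dropWhile_self (a : Int) : ∀ (r : List Int), (∀ x ∈ r, a ≤ x) →
    r.Pairwise (· ≤ ·) → a ∉ r.dropWhile (fun x => x == a) := by
  intro r
  induction r with
  | nil => intro _ _; simp
  | cons b r ih =>
    intro hge hp
    by_cases hb : b = a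
    · rw [List.dropWhile_cons_of_pos (by simp [hb])]
      exact ih (fun x hx => hge x (by simp [hx])) (List.pairwise_cons.mp hp).2
    · rw [List.dropWhile_cons_of_neg (by simp [hb])]
      intro hmem
      rcases List.mem_cons.mp hmem with h | h
      · exact hb h.symm
      · have h1 : b ≤ a := (List.pairwise_cons.mp hp).1 a h
        have h2 : a ≤ b := hge b (by simp)
        exact hb (le_antisymm h1 h2)

theorem divide_on_go_eq_aux : ∀ (n : Nat) (s : List Int), s.length ≤ n → s.Pairwise (· ≤ ·) →
    divide_on_go s = ∏ x ∈ s.toFinset, (List.count x s : Int) := by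
  intro n
  induction n with
  | zero =>
    intro s hl _
    have : s = [] := List.eq_nil_of_length_eq_zero (Nat.le_zero.mp hl)
    subst this; simp [divide_on_go]
  | succ n ih =>
    intro s hl hs
    match s with
    | [] => simp [divide_on_go]
    | a :: r =>
      have hr : r.takeWhile (fun x => x == a) ++ r.dropWhile (fun x => x == a) = r :=
        List.takeWhile_append_dropWhile
      set t := r.takeWhile (fun x => x == a) with ht
      set d := r.dropWhile (fun x => x == a) with hd
      have hta : ∀ x ∈ t, x = a := mem_takeWhile_eq a r
      have hdsub : d.Sublist r := List.dropWhile_sublist _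
      have hdr : ∀ x ∈ d, x ∈ r := fun x hx => hdsub.mem hx
      have hale : ∀ x ∈ r, a ≤ x := (List.pairwise_cons.mp hs).1
      have hdp : d.Pairwise (· ≤ ·) :=
        List.Pairwise.sublist (hdsub.cons a) hs
      have hand : a ∉ d :=
        not_mem_dropWhile_self a r hale ((List.pairwise_cons.mp hs).2)
      have hcnt_t : List.count a t = t.length := by
        rw [List.count_eq_length.mpr]
        intro x hx
        simpa using (hta x hx).symm
      have hcnt_d0 : List.count a d = 0 := List.count_eq_zero.mpr hand
      have hca : List.count a (a :: r) = t.length + 1 := by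
        rw [List.count_cons_self, ← hr, List.count_append, hcnt_t, hcnt_d0]
      -- for x ∈ d, count in whole list = count in d
      have hcd : ∀ x ∈ d, List.count x (a :: r) = List.count x d := by
        intro x hx
        have hxa : x ≠ a := fun h => hand (h ▸ hx)
        have hct : List.count x t = 0 := by
          rw [List.count_eq_zero]
          intro hxt; exact hxa (hta x hxt)
        rw [← hr]
        simp only [List.count_cons, List.count_append, hct]
        simp [Ne.symm hxa]
      have htf : (a :: r).toFinset = insert a d.toFinset := by
        ext x
        simp only [List.toFinset_cons, Finset.mem_insert, List.mem_toFinset, ← hr,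
          List.mem_append]
        constructor
        · rintro (h | h | h)
          · exact Or.inl h
          · exact Or.inl (hta x h)
          · exact Or.inr h
        · rintro (h | h)
          · exact Or.inl h
          · exact Or.inr (Or.inr h)
      have hdl : d.length ≤ n := by
        have h1 : d.length ≤ r.length := hdsub.length_le
        simp only [List.length_cons] at hl
        omega
      have ihd := ih d hdl hdp
      have hgo : divide_on_go (a :: r)
          = (List.count a (a :: r) : Int) * divide_on_go d := by
        rw [divide_on_go]
        by_cases hk : 1 < 1 + t.length
        · simp only [← ht, ← hd, if_pos hk]
          rw [hca]; push_cast; ring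
        · have ht0 : t.length = 0 := by omega
          simp only [← ht, ← hd, if_neg hk]
          rw [hca, ht0]; push_cast; ring
      rw [hgo, ihd, htf]
      rw [Finset.prod_insert (by simpa using hand)]
      congr 1
      exact Finset.prod_congr rfl (fun x hx => by
        rw [hcd x (List.mem_toFinset.mp hx)])

-- ===== VERDICT (by name: the statement is the Claim_ definition above) =====
theorem divide_on_spec : Claim_equal_divide_on := by
  intro list _
  unfold Spec_divide_on divide_on divide_on_alt
  set s := PySem.List.sorted list (fun x => x) false with hsdef
  have hperm : s.Perm list := PySem.List.sorted_perm list (fun x => x) false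
  have hpw : s.Pairwise (· ≤ ·) := PySem.List.sorted_pairwise list (fun x => x)
  rw [divide_on_foldl list list [] 1 (fun x hx => hx)]
  rw [divide_on_go_eq_aux s.length s (le_refl _) hpw]
  have htf : s.toFinset = list.toFinset := by
    ext x; simp [hperm.mem_iff]
  rw [htf]
  simp only [List.toFinset_nil, Finset.sdiff_empty, one_mul]
  exact (Finset.prod_congr rfl (fun x _ => by rw [hperm.count_eq x])).symm
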